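-- pv_equiv track=rewrite | github.com/harshilrpatel/The-Office-Simulator | DataProcessing/ConvertTranscriptFormat.py | _convert_lines
-- ===== SOURCE A (Python) =====
-- from typing import List
--
-- def _convert_lines(lines: List[str]) -> List[str]:
--     """
--     Convert lines from old format to new format
--
--     Old Format:
--         Michael
--         : All right Jim.
--         Jim
--         : Oh, I told you.
--
--     New Format:
--         Michael: All right Jim.
--         Jim: Oh, I told you.
--
--     Args:
--         lines: List of lines in old format
--
--     Returns:
--         List of lines in new format
--     """
--     converted = []
--     i = 0
--
--     while i < len(lines):
--         line = lines[i].rstrip('\n')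
--
--         # Check if this line is a character name (next line starts with :)
--         if i + 1 < len(lines):
--             next_line = lines[i + 1].strip()
--
--             # Pattern: Current line is character name, next line starts with ":"
--             if next_line.startswith(':'):
--                 # This is a character name
--                 character = line.strip()
--
--                 # Get the dialogue (remove leading ":")
--                 dialogue = next_line[1:].strip()
--
--                 # Check if dialogue continues on more lines
--                 # Look ahead to see if the next lines are continuation (don't start with : and aren't character names)
--                 j = i + 2
--                 dialogue_parts = [dialogue]
--
--                 while j < len(lines):
--                     peek_line = lines[j].strip()
--
--                     # Stop if empty line
--                     if not peek_line:
--                         break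
--
--                     # Stop if next line starts with : (new dialogue)
--                     if peek_line.startswith(':'):
--                         break
--
--                     # Stop if it looks like a character name (check if line after is ":")
--                     if j + 1 < len(lines) and lines[j + 1].strip().startswith(':'):
--                         break
--
--                     # This line is continuation of dialogue
--                     dialogue_parts.append(peek_line)
--                     j += 1
--
--                 # Combine all dialogue parts
--                 full_dialogue = ' '.join(dialogue_parts)
--
--                 # Write in new format: "Character: dialogue"
--                 converted.append(f"{character}: {full_dialogue}\n")
--
--                 # Skip processed lines
--                 i = j
--                 continue
--
--         # If we get here, this line is not a character:dialogue pattern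
--         # It might be an empty line, stage direction, etc. - keep as is
--         if line.strip():
--             converted.append(line + '\n')
--
--         i += 1
--
--     return converted
-- ===== SOURCE B (Python) =====
-- from typing import List
--
-- def _convert_lines(lines: List[str]) -> List[str]:
--     """Single forward pass with a speaker/dialogue state machine and one-line lookahead
--     instead of index-jumping."""
--     converted = []
--     character = None   # pending speaker name, if any
--     parts = None       # accumulated dialogue pieces; None while awaiting the ':' line
--     for idx, raw in enumerate(lines):
--         if character is not None and parts is None:
--             # raw is the ':' line that introduced the current speaker
--             parts = [raw.strip()[1:].strip()]
--             continue
--         nxt = lines[idx + 1] if idx + 1 < len(lines) else None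
--         is_name = nxt is not None and nxt.strip().startswith(':')
--         s = raw.strip()
--         if character is not None:
--             # inside a dialogue block: plain text lines extend the dialogue
--             if s and not s.startswith(':') and not is_name:
--                 parts.append(s)
--                 continue
--             converted.append(f"{character}: {' '.join(parts)}\n")
--             character = None
--             parts = None
--         if is_name:
--             character = s
--         elif s:
--             converted.append(raw.rstrip('\n') + '\n')
--     if character is not None and parts is not None:
--         converted.append(f"{character}: {' '.join(parts)}\n")
--     return converted
-- ===== Notes on version B (the rewrite author's own statement) =====
-- stated objective: alternative
-- what changed: Replaces A's index-jumping outer loop with a nested lookahead rescan ('while i', inner 'while j' then 'i = j; continue') by a single forward pass over the lines driven by a speaker/dialogue state machine (pending character, awaited ':' line, accumulated parts) with a one-line lookahead.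
import Mathlib
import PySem

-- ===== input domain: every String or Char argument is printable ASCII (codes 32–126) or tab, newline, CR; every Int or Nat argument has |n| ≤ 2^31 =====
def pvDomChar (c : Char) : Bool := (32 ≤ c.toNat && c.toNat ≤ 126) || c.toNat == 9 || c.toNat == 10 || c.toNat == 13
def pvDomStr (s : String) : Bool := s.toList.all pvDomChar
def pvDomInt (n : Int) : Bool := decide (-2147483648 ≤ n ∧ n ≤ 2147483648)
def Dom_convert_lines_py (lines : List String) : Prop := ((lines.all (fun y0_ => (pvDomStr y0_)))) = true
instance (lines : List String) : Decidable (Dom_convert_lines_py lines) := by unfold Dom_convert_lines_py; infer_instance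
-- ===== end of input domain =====

-- B replaces A's index-jumping/lookahead-rescan loop by a single forward pass with a
-- speaker/dialogue state machine (objective: alternative decomposition, same cost).
-- Neither implementation mutates its argument.

-- ===== PORT A =====

-- s.rstrip('\n') — hand port (no PySem primitive for rstrip with a chars argument); exact:
-- drops trailing '\n' characters.
def rstripNL (s : String) : String :=
  String.ofList ((s.toList.reverse.dropWhile (fun c => c == '\n')).reverse)

-- A's inner 'while j < len(lines)' lookahead loop: returns (dialogue_parts collected
-- after the first one, remaining lines lines[j:]).
def aCollect : List String → List String × List String
  | [] => ([], [])
  | r :: rest =>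
    let peek := PySem.Str.strip r
    if peek = "" then ([], r :: rest)
    else if PySem.Str.startswith peek ":" then ([], r :: rest)
    else
      match rest with
      | [] => ([peek], [])
      | r2 :: rest2 =>
        if PySem.Str.startswith (PySem.Str.strip r2) ":" then ([], r :: rest)
        else
          let p := aCollect (r2 :: rest2)
          (peek :: p.1, p.2)

theorem aCollect_len : ∀ xs : List String, (aCollect xs).2.length ≤ xs.length := by
  intro xs
  induction xs with
  | nil => simp [aCollect]
  | cons r rest ih =>
    cases rest with
    | nil =>
      simp only [aCollect]
      split_ifs <;> simp
    | cons r2 rest2 =>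
      simp only [aCollect]
      split_ifs <;> simp_all
      omega

-- A's outer 'while i < len(lines)' loop, as structural recursion on the suffix lines[i:]
-- (i only moves forward; 'i = j; continue' recurses on the remainder aCollect returns).
def aLoop : List String → List String
  | [] => []
  | [l] =>
    let line := rstripNL l
    if PySem.Str.strip line = "" then [] else [line ++ "\n"]
  | l :: l2 :: rest =>
    let line := rstripNL l
    let next_line := PySem.Str.strip l2
    if PySem.Str.startswith next_line ":" then
      let character := PySem.Str.strip line
      let dialogue := PySem.Str.strip (PySem.Str.slice next_line (some 1) none)
      let p := aCollect rest
      (character ++ ": " ++ PySem.Str.join " " (dialogue :: p.1) ++ "\n") :: aLoop p.2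
    else
      (if PySem.Str.strip line = "" then [] else [line ++ "\n"]) ++ aLoop (l2 :: rest)
termination_by xs => xs.length
decreasing_by
  · have := aCollect_len rest; simp; omega
  · simp

def convert_lines_py (lines : List String) : List String := aLoop lines

-- ===== PORT B =====

-- B's state: no pending speaker / speaker awaiting its ':' line / speaker with
-- accumulated dialogue parts (the (character, parts) variables of Source B).
inductive BSt
  | idle
  | await (c : String)
  | block (c : String) (ps : List String)

def bEntry (c : String) (ps : List String) : String :=
  c ++ ": " ++ PySem.Str.join " " ps ++ "\n"

-- is_name: next line exists and strips to something starting with ':'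
def bIsName : List String → Bool
  | [] => false
  | n :: _ => PySem.Str.startswith (PySem.Str.strip n) ":"

mutual
-- B's 'for idx, raw in enumerate(lines)' loop; rest.head? is the lines[idx+1] lookahead.
def bLoop : BSt → List String → List String
  | BSt.idle, [] => []
  | BSt.await _, [] => []
  | BSt.block c ps, [] => [bEntry c ps]
  | BSt.await c, raw :: rest =>
    bLoop (BSt.block c [PySem.Str.strip (PySem.Str.slice (PySem.Str.strip raw) (some 1) none)]) rest
  | BSt.idle, raw :: rest => bOuter raw rest
  | BSt.block c ps, raw :: rest =>
    let s := PySem.Str.strip raw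
    if s ≠ "" ∧ PySem.Str.startswith s ":" = false ∧ bIsName rest = false then
      bLoop (BSt.block c (ps ++ [s])) rest
    else
      bEntry c ps :: bOuter raw rest
termination_by _st l => (l.length, 1)

-- the fall-through tail of B's loop body (state holds no speaker any more)
def bOuter (raw : String) (rest : List String) : List String :=
  if bIsName rest = true then bLoop (BSt.await (PySem.Str.strip raw)) rest
  else if PySem.Str.strip raw ≠ "" then (rstripNL raw ++ "\n") :: bLoop BSt.idle rest
  else bLoop BSt.idle rest
termination_by (rest.length + 1, 0)
end

def convert_lines_py_alt (lines : List String) : List String := bLoop BSt.idle lines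

-- ===== PRECONDITION & SPEC =====
def Spec_convert_lines_py (lines : List String) (out : List String) : Prop := out = convert_lines_py_alt lines
instance (lines : List String) (out : List String) : Decidable (Spec_convert_lines_py lines out) := by unfold Spec_convert_lines_py; infer_instance

-- ===== CLAIM (what is proved, stated in full; the proofs are below) =====
def Claim_equal_convert_lines_py : Prop := ∀ (lines : List String), Dom_convert_lines_py lines → Spec_convert_lines_py lines (convert_lines_py lines)

-- ===== LEMMAS AND PROOFS =====

-- front dropWhile by a weaker predicate absorbs a previous dropWhile by a stronger one
theorem dropWhile_dropWhile_of_imp {α : Type} {p q : α → Bool}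
    (h : ∀ a, p a = true → q a = true) :
    ∀ l : List α, List.dropWhile q (List.dropWhile p l) = List.dropWhile q l := by
  intro l
  induction l with
  | nil => rfl
  | cons a t ih =>
    by_cases hp : p a = true
    · simp [hp, h a hp, ih]
    · simp [List.dropWhile_cons, hp]

-- a front dropWhile and a back dropWhile commute
theorem dropWhile_rdropWhile_comm {α : Type} (p q : α → Bool) :
    ∀ l : List α,
      List.dropWhile p ((List.dropWhile q l.reverse).reverse)
        = (List.dropWhile q (List.dropWhile p l).reverse).reverse := by
  intro l
  induction l using List.reverseRecOn with
  | nil => rfl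
  | append_singleton t a ih =>
    by_cases hq : q a = true
    · by_cases he : List.dropWhile p t = []
      · by_cases hp : p a = true
        · simp [List.dropWhile_append, he, hq, hp, ih]
        · simp [List.dropWhile_append, he, hq, hp, ih]
      · simp [List.dropWhile_append, he, hq, ih]
    · by_cases he : List.dropWhile p t = []
      · by_cases hp : p a = true
        · simp [List.dropWhile_append, he, hq, hp]
        · simp [List.dropWhile_append, he, hq, hp]
      · simp [List.dropWhile_append, he, hq]

theorem chars_strip_rstripNL (cs : List Char) :
    PySem.Chars.strip ((cs.reverse.dropWhile (fun c => c == '\n')).reverse)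
      = PySem.Chars.strip cs := by
  have himp : ∀ c : Char, (c == '\n') = true → PySem.Chars.isspace c = true := by
    intro c hc
    have : c = '\n' := by simpa using hc
    subst this; decide
  simp only [PySem.Chars.strip, PySem.Chars.lstrip, PySem.Chars.rstrip]
  rw [dropWhile_rdropWhile_comm]
  simp only [List.reverse_reverse]
  rw [dropWhile_dropWhile_of_imp himp]
  rw [dropWhile_rdropWhile_comm]

theorem str_strip_rstripNL (s : String) :
    PySem.Str.strip (rstripNL s) = PySem.Str.strip s := by
  have h1 : (PySem.Str.strip (rstripNL s)).toList = (PySem.Str.strip s).toList := by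
    simp only [PySem.Str.toList_strip]
    have : (rstripNL s).toList = (s.toList.reverse.dropWhile (fun c => c == '\n')).reverse := by
      simp [rstripNL]
    rw [this, chars_strip_rstripNL]
  exact String.toList_inj.mp h1

-- aCollect on a line that ends the lookahead loop (empty / ':'-start / name ahead)
theorem aCollect_stop (r : String) (rest : List String)
    (h : PySem.Str.strip r = "" ∨ PySem.Str.startswith (PySem.Str.strip r) ":" = true
          ∨ bIsName rest = true) :
    aCollect (r :: rest) = ([], r :: rest) := by
  cases rest with
  | nil => simp only [aCollect]; split_ifs <;> simp_all [bIsName]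
  | cons r2 rest2 => simp only [aCollect]; split_ifs <;> simp_all [bIsName]

-- aCollect on a continuation line
theorem aCollect_cont (r : String) (rest : List String)
    (h1 : ¬ PySem.Str.strip r = "")
    (h2 : PySem.Str.startswith (PySem.Str.strip r) ":" = false)
    (h3 : bIsName rest = false) :
    aCollect (r :: rest) = (PySem.Str.strip r :: (aCollect rest).1, (aCollect rest).2) := by
  cases rest with
  | nil =>
    simp only [aCollect]
    rw [if_neg h1, if_neg (by rw [h2]; decide)]
  | cons r2 rest2 =>
    have h3' : PySem.Str.startswith (PySem.Str.strip r2) ":" = false := by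
      simpa [bIsName] using h3
    simp only [aCollect]
    rw [if_neg h1, if_neg (by rw [h2]; decide), if_neg (by rw [h3']; decide)]

theorem bLoop_idle_cons (raw : String) (rest : List String) :
    bLoop BSt.idle (raw :: rest) = bOuter raw rest := by
  simp only [bLoop]

theorem bLoop_block_flush (c raw : String) (ps rest : List String)
    (h : PySem.Str.strip raw = "" ∨ PySem.Str.startswith (PySem.Str.strip raw) ":" = true
          ∨ bIsName rest = true) :
    bLoop (BSt.block c ps) (raw :: rest) = bEntry c ps :: bOuter raw rest := by
  simp only [bLoop]
  rw [if_neg]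
  rintro ⟨a, b, c⟩
  rcases h with h | h | h <;> simp_all

theorem bLoop_block_cont (c raw : String) (ps rest : List String)
    (h1 : ¬ PySem.Str.strip raw = "")
    (h2 : PySem.Str.startswith (PySem.Str.strip raw) ":" = false)
    (h3 : bIsName rest = false) :
    bLoop (BSt.block c ps) (raw :: rest)
      = bLoop (BSt.block c (ps ++ [PySem.Str.strip raw])) rest := by
  simp only [bLoop]
  rw [if_pos ⟨h1, h2, h3⟩]

-- B in a dialogue block collects exactly A's lookahead parts, then flushes the entry
-- and resumes idle on what A leaves to be reprocessed
theorem bLoop_block (c : String) :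
    ∀ (xs : List String) (ds : List String),
      bLoop (BSt.block c ds) xs
        = bEntry c (ds ++ (aCollect xs).1) :: bLoop BSt.idle (aCollect xs).2 := by
  intro xs
  induction xs with
  | nil => intro ds; simp [bLoop, aCollect]
  | cons r rest ih =>
    intro ds
    by_cases h1 : PySem.Str.strip r = ""
    · rw [aCollect_stop r rest (Or.inl h1), bLoop_block_flush c r ds rest (Or.inl h1),
        bLoop_idle_cons]
      simp
    · by_cases h2 : PySem.Str.startswith (PySem.Str.strip r) ":" = true
      · rw [aCollect_stop r rest (Or.inr (Or.inl h2)),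
          bLoop_block_flush c r ds rest (Or.inr (Or.inl h2)), bLoop_idle_cons]
        simp
      · have h2' : PySem.Str.startswith (PySem.Str.strip r) ":" = false := by
          simpa using h2
        by_cases h3 : bIsName rest = true
        · rw [aCollect_stop r rest (Or.inr (Or.inr h3)),
            bLoop_block_flush c r ds rest (Or.inr (Or.inr h3)), bLoop_idle_cons]
          simp
        · have h3' : bIsName rest = false := by simpa using h3
          rw [aCollect_cont r rest h1 h2' h3', bLoop_block_cont c r ds rest h1 h2' h3', ih]
          simp

theorem bLoop_await (c raw : String) (rest : List String) :
    bLoop (BSt.await c) (raw :: rest)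
      = bLoop (BSt.block c
          [PySem.Str.strip (PySem.Str.slice (PySem.Str.strip raw) (some 1) none)]) rest := by
  simp only [bLoop]

theorem aLoop_eq_bLoop : ∀ (n : Nat) (xs : List String), xs.length ≤ n →
    aLoop xs = bLoop BSt.idle xs := by
  intro n
  induction n with
  | zero =>
    intro xs h
    have : xs = [] := by cases xs <;> simp_all
    subst this; simp [aLoop, bLoop]
  | succ n ih =>
    intro xs h
    match xs with
    | [] => simp [aLoop, bLoop]
    | [l] =>
      rw [bLoop_idle_cons]
      simp only [bOuter]
      have hb0 : bIsName ([] : List String) = false := rfl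
      rw [hb0, if_neg (show ¬ (false = true) by decide)]
      simp only [aLoop]
      rw [str_strip_rstripNL]
      by_cases h1 : PySem.Str.strip l = ""
      · rw [if_pos h1, if_neg (show ¬ (PySem.Str.strip l ≠ "") from not_not_intro h1)]
        simp [bLoop]
      · rw [if_neg h1, if_pos (show PySem.Str.strip l ≠ "" from h1)]
        simp [bLoop]
    | l :: l2 :: rest =>
      by_cases hn : PySem.Str.startswith (PySem.Str.strip l2) ":" = true
      · have hb : bLoop BSt.idle (l :: l2 :: rest)
            = bLoop (BSt.block (PySem.Str.strip l)
                [PySem.Str.strip (PySem.Str.slice (PySem.Str.strip l2) (some 1) none)]) rest := by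
          rw [bLoop_idle_cons]
          simp only [bOuter]
          rw [if_pos (by simpa [bIsName] using hn), bLoop_await]
        have ha : aLoop (l :: l2 :: rest)
            = (PySem.Str.strip (rstripNL l) ++ ": "
                ++ PySem.Str.join " "
                    (PySem.Str.strip (PySem.Str.slice (PySem.Str.strip l2) (some 1) none)
                      :: (aCollect rest).1) ++ "\n") :: aLoop (aCollect rest).2 := by
          simp only [aLoop]
          rw [if_pos hn]
        have hr : (aCollect rest).2.length ≤ n := by
          have := aCollect_len rest
          simp at h; omega
        rw [ha, hb, bLoop_block, ih _ hr, str_strip_rstripNL]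
        simp [bEntry]
      · have hrest : (l2 :: rest).length ≤ n := by simp at h ⊢; omega
        have ha : aLoop (l :: l2 :: rest)
            = (if PySem.Str.strip (rstripNL l) = "" then [] else [rstripNL l ++ "\n"])
                ++ aLoop (l2 :: rest) := by
          simp only [aLoop]
          rw [if_neg hn]
        have hn' : PySem.Str.startswith (PySem.Str.strip l2) ":" = false := by
          simpa using hn
        have hbn : bIsName (l2 :: rest) = false := by
          simp only [bIsName]; exact hn'
        rw [ha, bLoop_idle_cons]
        simp only [bOuter]
        rw [hbn, if_neg (show ¬ (false = true) by decide), str_strip_rstripNL, ih _ hrest]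
        by_cases h1 : PySem.Str.strip l = ""
        · rw [if_pos h1, if_neg (show ¬ (PySem.Str.strip l ≠ "") from not_not_intro h1)]
          simp
        · rw [if_neg h1, if_pos (show PySem.Str.strip l ≠ "" from h1)]
          simp

-- ===== VERDICT (by name: the statement is the Claim_ definition above) =====
theorem convert_lines_py_spec : Claim_equal_convert_lines_py := by
  intro lines _
  unfold Spec_convert_lines_py convert_lines_py convert_lines_py_alt
  exact aLoop_eq_bLoop lines.length lines (le_refl _)
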